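-- pv_equiv track=rewrite | github.com/paul468/binary_converter | binary.py | remove_zeros_in_front
-- ===== SOURCE A (Python) =====
-- def remove_zeros_in_front(string, zero):
--     new_string = ""
--     found_first_digit = False
--     for i in string:
--         if i == zero and not found_first_digit:
--             pass
--         elif i == zero and found_first_digit:
--             new_string += i
--         elif i != zero:
--             found_first_digit = True
--             new_string += i
--     return new_string
-- ===== SOURCE B (Python) =====
-- def remove_zeros_in_front(string, zero):
--     for i in range(len(string)):
--         if string[i] != zero:
--             return string[i:]
--     return ""
-- ===== Notes on version B (the rewrite author's own statement) =====
-- stated objective: simpler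
-- what changed: Instead of accumulating the kept characters one by one with a found-first flag, B scans for the first character that differs from zero and returns a single tail slice from there (empty string if none).
import Mathlib
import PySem

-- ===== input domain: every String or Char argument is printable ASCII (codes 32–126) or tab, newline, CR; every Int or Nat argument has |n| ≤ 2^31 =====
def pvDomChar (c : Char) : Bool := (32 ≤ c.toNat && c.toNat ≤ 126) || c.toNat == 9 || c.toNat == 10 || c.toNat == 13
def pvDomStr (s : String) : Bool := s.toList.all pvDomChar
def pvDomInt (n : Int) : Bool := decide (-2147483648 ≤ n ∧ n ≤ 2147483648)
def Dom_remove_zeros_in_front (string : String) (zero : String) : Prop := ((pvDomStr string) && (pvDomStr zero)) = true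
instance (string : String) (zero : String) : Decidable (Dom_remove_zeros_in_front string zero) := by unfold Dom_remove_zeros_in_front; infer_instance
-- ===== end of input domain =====

-- B replaces A's accumulate-with-flag loop by returning the tail slice from the first char that differs from zero (simpler).
-- ===== PORT A =====
-- loop state: accumulated new_string (as List Char) and the found_first_digit flag
def pvGoA (zero : String) : List Char → List Char → Bool → List Char
  | [], acc, _ => acc
  | c :: rest, acc, found =>
    if String.ofList [c] == zero && !found then pvGoA zero rest acc found
    else if String.ofList [c] == zero && found then pvGoA zero rest (acc ++ [c]) found
    else if String.ofList [c] != zero then pvGoA zero rest (acc ++ [c]) true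
    else pvGoA zero rest acc found

def remove_zeros_in_front (string : String) (zero : String) : String :=
  String.ofList (pvGoA zero string.toList [] false)

-- ===== PORT B =====
-- scan for the first index whose character differs from zero; return the slice from there, else ""
def pvGoB (zero : String) : List Char → List Char
  | [] => []
  | c :: rest => if String.ofList [c] != zero then c :: rest else pvGoB zero rest

def remove_zeros_in_front_alt (string : String) (zero : String) : String :=
  String.ofList (pvGoB zero string.toList)

-- ===== PRECONDITION & SPEC =====
def Spec_remove_zeros_in_front (string : String) (zero : String) (out : String) : Prop := out = remove_zeros_in_front_alt string zero
instance (string : String) (zero : String) (out : String) : Decidable (Spec_remove_zeros_in_front string zero out) := by unfold Spec_remove_zeros_in_front; infer_instance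

-- ===== CLAIM (what is proved, stated in full; the proofs are below) =====
def Claim_equal_remove_zeros_in_front : Prop := ∀ (string : String) (zero : String), Dom_remove_zeros_in_front string zero → Spec_remove_zeros_in_front string zero (remove_zeros_in_front string zero)

-- ===== LEMMAS AND PROOFS =====

-- ===== VERDICT (by name: the statement is the Claim_ definition above) =====
lemma pvGoA_true (zero : String) (l : List Char) : ∀ acc, pvGoA zero l acc true = acc ++ l := by
  induction l with
  | nil => intro acc; simp [pvGoA]
  | cons c rest ih =>
    intro acc
    by_cases h : String.ofList [c] = zero <;> simp [pvGoA, h, ih]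

lemma pvGoA_false (zero : String) (l : List Char) : ∀ acc, pvGoA zero l acc false = acc ++ pvGoB zero l := by
  induction l with
  | nil => intro acc; simp [pvGoA, pvGoB]
  | cons c rest ih =>
    intro acc
    by_cases h : String.ofList [c] = zero
    · simp [pvGoA, pvGoB, h, ih]
    · simp [pvGoA, pvGoB, h, pvGoA_true]

theorem remove_zeros_in_front_spec : Claim_equal_remove_zeros_in_front := by
  intro s z _
  unfold Spec_remove_zeros_in_front remove_zeros_in_front remove_zeros_in_front_alt
  rw [pvGoA_false]
  simp
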